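-- pv_equiv track=rewrite | github.com/mkesicki/trip-planner | model/Renfe.py | findStation
-- ===== SOURCE A (Python) =====
-- def findStation(city: str, stations: list) -> dict:
--     """Finds a station from the list with a prioritized search."""
--     city_lower = city.lower()
--
--     # Priority 1: Exact match for "City (todas)"
--     for station in stations:
--         if station.get("desgEstacion", "").lower() == f"{city_lower} (todas)":
--             return station
--
--     # Priority 2: Match for "City-"
--     for station in stations:
--         if station.get("desgEstacion", "").lower() == f"{city_lower}-":
--             return station
--
--     # Priority 3: Substring match
--     for station in stations:
--         if city_lower in station.get("desgEstacion", "").lower():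
--             return station
--
--     return {} # Return empty dict if no station is found
-- ===== SOURCE B (Python) =====
-- def findStation(city: str, stations: list) -> dict:
--     """Single pass: return immediately on a priority-1 match, remember the
--     first priority-2 and priority-3 candidates, resolve after the scan."""
--     city_lower = city.lower()
--     p2 = None
--     p3 = None
--     for station in stations:
--         d = station.get("desgEstacion", "").lower()
--         if d == f"{city_lower} (todas)":
--             return station
--         if p2 is None and d == f"{city_lower}-":
--             p2 = station
--         elif p3 is None and city_lower in d:
--             p3 = station
--     if p2 is not None:
--         return p2
--     if p3 is not None:
--         return p3
--     return {}
-- ===== Notes on version B (the rewrite author's own statement) =====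
-- stated objective: alternative
-- what changed: A makes three sequential passes over the station list, one per priority; B makes a single pass that returns immediately on a priority-1 match and remembers the first priority-2 and priority-3 candidates, resolving them after the scan.
import Mathlib
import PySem

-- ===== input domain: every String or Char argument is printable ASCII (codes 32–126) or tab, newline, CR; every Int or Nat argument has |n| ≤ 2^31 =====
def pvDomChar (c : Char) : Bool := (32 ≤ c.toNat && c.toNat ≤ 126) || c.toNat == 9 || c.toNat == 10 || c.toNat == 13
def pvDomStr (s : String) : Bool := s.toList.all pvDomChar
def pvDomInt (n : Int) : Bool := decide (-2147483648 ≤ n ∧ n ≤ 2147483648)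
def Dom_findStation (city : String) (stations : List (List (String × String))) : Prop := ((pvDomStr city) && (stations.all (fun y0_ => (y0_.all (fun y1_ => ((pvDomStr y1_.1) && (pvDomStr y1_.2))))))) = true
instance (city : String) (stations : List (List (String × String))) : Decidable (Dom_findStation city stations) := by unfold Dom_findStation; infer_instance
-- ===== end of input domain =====

-- B is a single pass over the stations instead of A's three sequential scans (objective: alternative decomposition; same result).

-- shared helper: station.get("desgEstacion", "").lower() as a character list
def pvDesg (station : List (String × String)) : List Char :=
  PySem.Chars.lower ((PySem.Dict.mk station).getD "desgEstacion" "").toList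

-- ===== PORT A =====
-- three sequential scans, each an early-return loop (List.find?)
def findStation (city : String) (stations : List (List (String × String))) : List (String × String) :=
  let cityLower := PySem.Chars.lower city.toList
  match stations.find? (fun st => pvDesg st == cityLower ++ " (todas)".toList) with
  | some st => st
  | none =>
    match stations.find? (fun st => pvDesg st == cityLower ++ ['-']) with
    | some st => st
    | none =>
      match stations.find? (fun st => PySem.Chars.isIn cityLower (pvDesg st)) with
      | some st => st
      | none => []

-- ===== PORT B =====
-- single pass: early return on priority 1, remember first priority-2/3 candidates
def findStationGo (cityLower : List Char) (p2 p3 : Option (List (String × String))) :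
    List (List (String × String)) → List (String × String)
  | [] =>
    match p2 with
    | some st => st
    | none =>
      match p3 with
      | some st => st
      | none => []
  | st :: rest =>
    let d := pvDesg st
    if d == cityLower ++ " (todas)".toList then st
    else if p2.isNone && (d == cityLower ++ ['-']) then findStationGo cityLower (some st) p3 rest
    else if p3.isNone && PySem.Chars.isIn cityLower d then findStationGo cityLower p2 (some st) rest
    else findStationGo cityLower p2 p3 rest

def findStation_alt (city : String) (stations : List (List (String × String))) : List (String × String) :=
  findStationGo (PySem.Chars.lower city.toList) none none stations

-- ===== PRECONDITION & SPEC =====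
def Spec_findStation (city : String) (stations : List (List (String × String))) (out : List (String × String)) : Prop := out = findStation_alt city stations
instance (city : String) (stations : List (List (String × String))) (out : List (String × String)) : Decidable (Spec_findStation city stations out) := by unfold Spec_findStation; infer_instance

-- ===== CLAIM (what is proved, stated in full; the proofs are below) =====
def Claim_equal_findStation : Prop := ∀ (city : String) (stations : List (List (String × String))), Dom_findStation city stations → Spec_findStation city stations (findStation city stations)

-- ===== LEMMAS AND PROOFS =====

-- loop invariant: the single pass with pending candidates p2/p3 equals the three-scan result
theorem findStationGo_eq (cityLower : List Char) (l : List (List (String × String)))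
    (p2 p3 : Option (List (String × String))) :
    findStationGo cityLower p2 p3 l =
      match l.find? (fun st => pvDesg st == cityLower ++ " (todas)".toList) with
      | some st => st
      | none =>
        match (match p2 with
               | some st => some st
               | none => l.find? (fun st => pvDesg st == cityLower ++ ['-'])) with
        | some st => st
        | none =>
          match (match p3 with
                 | some st => some st
                 | none => l.find? (fun st => PySem.Chars.isIn cityLower (pvDesg st))) with
          | some st => st
          | none => [] := by
  induction l generalizing p2 p3 with
  | nil => cases p2 <;> cases p3 <;> simp [findStationGo]
  | cons st rest ih =>
    by_cases h1 : pvDesg st = cityLower ++ [' ', '(', 't', 'o', 'd', 'a', 's', ')']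
    · simp [findStationGo, List.find?_cons, h1]
    · have h1b : (pvDesg st == cityLower ++ " (todas)".toList) = false := by
        simpa using h1
      by_cases h2 : pvDesg st = cityLower ++ ['-']
      · have h3 : PySem.Chars.isIn cityLower (pvDesg st) = true := by
          rw [h2, PySem.Chars.isIn_iff_infix]; exact (List.prefix_append _ _).isInfix
        cases p2 with
        | none => simp [findStationGo, List.find?_cons, h1, h1b, h2, h3, ih] <;>
            cases p3 <;> simp
        | some s2 => cases p3 <;>
            simp [findStationGo, List.find?_cons, h1, h1b, h2, h3, ih]
      · have h2b : (pvDesg st == cityLower ++ ['-']) = false := by simpa using h2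
        by_cases h3 : PySem.Chars.isIn cityLower (pvDesg st) = true
        · cases p2 <;> cases p3 <;>
            simp [findStationGo, List.find?_cons, h1, h1b, h2, h2b, h3, ih]
        · cases p2 <;> cases p3 <;>
            simp [findStationGo, List.find?_cons, h1, h1b, h2, h2b, h3, ih]

-- ===== VERDICT (by name: the statement is the Claim_ definition above) =====
theorem findStation_spec : Claim_equal_findStation := by
  intro city stations _
  unfold Spec_findStation findStation findStation_alt
  rw [findStationGo_eq]
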